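-- pv_equiv track=rewrite | github.com/pypi-data/pypi-mirror-22 | packages/hiwi/hiwi-0.1.tar.gz/hiwi-0.1/hiwi/hiwi.py | _get_session_config_end_pos
-- ===== SOURCE A (Python) =====
-- def _get_session_config_end_pos(session_config):
-- 	bracket_counter = 0
-- 	last_closing_pos = 0
-- 	for pos, char in enumerate(session_config):
-- 		if char == '[':
-- 			bracket_counter += 1
-- 		if char == ']':
-- 			bracket_counter -= 1
-- 			last_closing_pos = pos
--
-- 	if bracket_counter != 0:
-- 		raise IllFormatedSessionConfigs("brackets do not match")
-- 	return last_closing_pos+1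
-- ===== SOURCE B (Python) =====
-- class IllFormatedSessionConfigs(Exception):
-- 	pass
--
--
-- def _get_session_config_end_pos(session_config):
-- 	if session_config.count('[') != session_config.count(']'):
-- 		raise IllFormatedSessionConfigs("brackets do not match")
-- 	positions = [pos for pos, char in enumerate(session_config) if char == ']']
-- 	return (positions[-1] + 1) if positions else 1
-- ===== Notes on version B (the rewrite author's own statement) =====
-- stated objective: simpler
-- what changed: Replaces A's fused counter/last-position loop with a count-equality check plus a comprehension collecting ']' positions, returning the last position + 1 (or 1 if none).
import Mathlib
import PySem

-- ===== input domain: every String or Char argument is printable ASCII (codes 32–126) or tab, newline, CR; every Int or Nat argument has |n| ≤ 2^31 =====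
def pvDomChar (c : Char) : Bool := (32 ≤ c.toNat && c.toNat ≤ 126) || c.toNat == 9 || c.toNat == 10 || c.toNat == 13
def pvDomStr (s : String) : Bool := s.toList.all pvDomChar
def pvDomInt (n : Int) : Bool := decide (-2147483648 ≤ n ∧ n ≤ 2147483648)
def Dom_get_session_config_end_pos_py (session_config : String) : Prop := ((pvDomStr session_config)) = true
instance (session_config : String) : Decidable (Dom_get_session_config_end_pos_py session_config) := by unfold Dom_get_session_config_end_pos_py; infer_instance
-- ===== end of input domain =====

-- B replaces A's fused counter/last-position loop with a count-equality check and a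
-- comprehension of ']' positions, returning the last one + 1 (or 1 if none): simpler.


-- ===== PORT A =====
-- A's loop body: two independent 'if's over the running (bracket_counter, last_closing_pos)
def pvStepA (st : Int × Int) (pc : Int × Char) : Int × Int :=
  let st := if pc.2 = '[' then (st.1 + 1, st.2) else st
  if pc.2 = ']' then (st.1 - 1, pc.1) else st

def get_session_config_end_pos_py (session_config : String) : Int :=
  -- the raise on bracket_counter ≠ 0 is excluded by Pre_ below
  let r := (PySem.List.enumerate session_config.toList 0).foldl pvStepA (0, 0)
  r.2 + 1

-- ===== PORT B =====
def get_session_config_end_pos_py_alt (session_config : String) : Int :=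
  -- the count-mismatch raise is excluded by Pre_ below
  let positions := (PySem.List.enumerate session_config.toList 0).filterMap
    (fun pc => if pc.2 = ']' then some pc.1 else none)
  match positions.getLast? with      -- positions[-1] if positions else branch
  | some p => p + 1
  | none => 1

-- ===== PRECONDITION & SPEC =====
-- Pre_ excludes exactly the inputs on which Python A raises instead of returning
-- (B raises there too): unequal numbers of '[' and ']'
def Pre_get_session_config_end_pos_py (session_config : String) : Prop :=
  PySem.List.count session_config.toList '[' = PySem.List.count session_config.toList ']'
instance (session_config : String) : Decidable (Pre_get_session_config_end_pos_py session_config) := by unfold Pre_get_session_config_end_pos_py; infer_instance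

def pvWitness_get_session_config_end_pos_py : String := "a[b]c[]"

def Spec_get_session_config_end_pos_py (session_config : String) (out : Int) : Prop := out = get_session_config_end_pos_py_alt session_config
instance (session_config : String) (out : Int) : Decidable (Spec_get_session_config_end_pos_py session_config out) := by unfold Spec_get_session_config_end_pos_py; infer_instance

-- ===== CLAIM (what is proved, stated in full; the proofs are below) =====
def Claim_equal_get_session_config_end_pos_py : Prop := ∀ (session_config : String), Dom_get_session_config_end_pos_py session_config → Pre_get_session_config_end_pos_py session_config → Spec_get_session_config_end_pos_py session_config (get_session_config_end_pos_py session_config)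

-- ===== LEMMAS AND PROOFS =====
theorem pv_getLast?_getD_cons (x : Int) (xs : List Int) (d : Int) :
    ((x :: xs).getLast?).getD d = (xs.getLast?).getD x := by
  cases xs with
  | nil => simp
  | cons y ys =>
    rw [List.getLast?_cons_cons]
    cases h : (y :: ys).getLast? with
    | none => simp [List.getLast?_eq_none_iff] at h
    | some z => simp

-- A's second state component equals the last collected ']' position, defaulting to the
-- incoming accumulator value
theorem pv_snd_foldA (l : List Char) (i c last : Int) :
    ((PySem.List.enumerate l i).foldl pvStepA (c, last)).2
      = (((PySem.List.enumerate l i).filterMap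
          (fun pc => if pc.2 = ']' then some pc.1 else none)).getLast?).getD last := by
  induction l generalizing i c last with
  | nil => simp [PySem.List.enumerate_nil]
  | cons a t ih =>
    rw [PySem.List.enumerate_cons, List.foldl_cons, List.filterMap_cons]
    by_cases h : a = ']'
    · subst h
      have h1 : pvStepA (c, last) (i, ']') = (c - 1, i) := by simp [pvStepA]
      simp only [h1, if_true]
      rw [pv_getLast?_getD_cons]
      exact ih _ _ _
    · by_cases h2 : a = '['
      · simp only [pvStepA, if_pos h2, h]
        exact ih _ _ _
      · simp only [pvStepA, if_neg h2, h]
        exact ih _ _ _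

-- ===== VERDICT (by name: the statement is the Claim_ definition above) =====
theorem get_session_config_end_pos_py_spec : Claim_equal_get_session_config_end_pos_py := by
  intro s _ _
  unfold Spec_get_session_config_end_pos_py get_session_config_end_pos_py
    get_session_config_end_pos_py_alt
  simp only [pv_snd_foldA]
  cases ((PySem.List.enumerate s.toList 0).filterMap
      (fun pc => if pc.2 = ']' then some pc.1 else none)).getLast? <;> simp
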